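-- pv_equiv track=rewrite | github.com/zzflux/ProjectEuler | Euler38-PandigitalMultiples.py | setIsPandigital
-- ===== SOURCE A (Python) =====
-- def setIsPandigital(lst, digits = '123456789'):
--     used = [False] * len(str(digits))
--     for n in lst:
--         for d in str(n):
--             index = str(digits).find(d)
--             if index == -1 or used[index]:
--                 return False
--             used[index] = True
--     return all(used)
-- ===== SOURCE B (Python) =====
-- def setIsPandigital(lst, digits = '123456789'):
--     d = str(digits)
--     s = ''.join(str(n) for n in lst)
--     return len(set(d)) == len(d) and sorted(s) == sorted(d)
-- ===== Notes on version B (the rewrite author's own statement) =====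
-- stated objective: simpler
-- what changed: Replaces A's stateful early-exit marking table (a used[] array updated per digit with str.find lookups) by an aggregate-then-compare: concatenate all str(n), then test that the digit string has distinct characters and that the concatenation is a permutation of it via sorted() equality.
import Mathlib
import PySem

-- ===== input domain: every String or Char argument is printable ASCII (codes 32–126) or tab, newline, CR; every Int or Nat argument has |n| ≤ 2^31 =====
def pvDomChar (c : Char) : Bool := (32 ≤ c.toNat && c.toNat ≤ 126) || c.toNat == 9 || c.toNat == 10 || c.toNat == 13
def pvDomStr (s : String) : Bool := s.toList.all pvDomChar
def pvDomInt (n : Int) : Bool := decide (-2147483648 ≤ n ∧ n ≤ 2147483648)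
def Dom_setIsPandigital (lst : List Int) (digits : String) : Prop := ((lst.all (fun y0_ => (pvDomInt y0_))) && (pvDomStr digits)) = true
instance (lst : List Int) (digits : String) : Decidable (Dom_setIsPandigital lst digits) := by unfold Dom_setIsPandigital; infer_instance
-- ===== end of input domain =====

-- B replaces A's stateful early-exit marking table by "concatenate, then compare sorted digit multisets
-- (plus a distinctness check on the digit string)"; objective: simpler.

-- ===== PORT A =====
-- inner loop 'for d in str(n)': threads 'used'; 'none' = the early 'return False'.
-- 'used[index]' / 'used[index] = True' are in range whenever index ≠ -1 (str.find returns an index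
-- < len(digits) = len(used)), so the total forms pyGetD/pySetD are exact here.
def pvMarkChars (dl : List Char) (ds : List Char) (used : List Bool) : Option (List Bool) :=
  match ds with
  | [] => some used
  | d :: rest =>
    let index := PySem.Chars.find dl [d]
    if index == -1 || PySem.List.pyGetD used index false then none
    else pvMarkChars dl rest (PySem.List.pySetD used index true)

-- outer loop 'for n in lst'
def pvMarkList (dl : List Char) (l : List Int) (used : List Bool) : Option (List Bool) :=
  match l with
  | [] => some used
  | n :: rest =>
    match pvMarkChars dl (PySem.Int.toChars n) used with
    | none => none
    | some u => pvMarkList dl rest u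

def setIsPandigital (lst : List Int) (digits : String) : Bool :=
  match pvMarkList digits.toList lst (List.replicate digits.toList.length false) with
  | none => false
  | some u => u.all id

-- ===== PORT B =====
def setIsPandigital_alt (lst : List Int) (digits : String) : Bool :=
  let d := digits.toList
  let s := PySem.Chars.join [] (lst.map PySem.Int.toChars)
  (PySem.Set.len (PySem.Set.ofList d) == (d.length : Int))
    && (PySem.List.sorted s (fun x => x) == PySem.List.sorted d (fun x => x))

-- ===== PRECONDITION & SPEC =====
def Spec_setIsPandigital (lst : List Int) (digits : String) (out : Bool) : Prop := out = setIsPandigital_alt lst digits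
instance (lst : List Int) (digits : String) (out : Bool) : Decidable (Spec_setIsPandigital lst digits out) := by unfold Spec_setIsPandigital; infer_instance

-- ===== CLAIM (what is proved, stated in full; the proofs are below) =====
def Claim_equal_setIsPandigital : Prop := ∀ (lst : List Int) (digits : String), Dom_setIsPandigital lst digits → Spec_setIsPandigital lst digits (setIsPandigital lst digits)

-- ===== LEMMAS AND PROOFS =====

-- str.find for a single-character needle is idxOf?
theorem pvFind_singleton (dl : List Char) (c : Char) :
    PySem.Chars.find dl [c] =
      (match List.idxOf? c dl with | none => -1 | some i => (i : Int)) := by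
  have hsing : ∀ (l : List Char), [c] <+: l ↔ l.head? = some c := by
    intro l
    cases l with
    | nil => simp
    | cons a r =>
      constructor
      · rintro ⟨rr, hrr⟩
        simp only [List.singleton_append, List.cons.injEq] at hrr
        simp [hrr.1]
      · intro hh
        simp only [List.head?_cons, Option.some.injEq] at hh
        exact ⟨r, by simp [hh]⟩
  cases h : List.idxOf? c dl with
  | none =>
    have hc : c ∉ dl := List.idxOf?_eq_none_iff.mp h
    have hni : ¬ ([c] <:+: dl) := fun hin => hc (List.singleton_sublist.mp hin.sublist)
    simpa using (PySem.Chars.find_eq_neg_one_iff dl [c]).mpr hni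
  | some i =>
    obtain ⟨hi, hei, hmin⟩ := List.idxOf?_eq_some_iff.mp h
    have hmem : c ∈ dl := hei ▸ List.getElem_mem hi
    have hinf : [c] <:+: dl := by
      obtain ⟨s, t, hst⟩ := List.append_of_mem hmem
      exact ⟨s, t, by simp [hst]⟩
    have h0 : 0 ≤ PySem.Chars.find dl [c] := (PySem.Chars.find_nonneg_iff dl [c]).mpr hinf
    obtain ⟨hpre, hmin'⟩ := PySem.Chars.find_spec h0
    have htc : dl[(PySem.Chars.find dl [c]).toNat]? = some c := by
      rw [← List.head?_drop]
      exact (hsing _).mp hpre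
    have ht_lt : (PySem.Chars.find dl [c]).toNat < dl.length := by
      by_contra hcon
      rw [List.getElem?_eq_none (by omega)] at htc
      cases htc
    have htc' : dl[(PySem.Chars.find dl [c]).toNat]'ht_lt = c := by
      rw [List.getElem?_eq_getElem ht_lt] at htc
      exact Option.some.inj htc
    have h1 : i ≤ (PySem.Chars.find dl [c]).toNat := by
      by_contra hcon
      exact hmin _ (by omega) htc'
    have h2 : (PySem.Chars.find dl [c]).toNat ≤ i := by
      by_contra hcon
      exact hmin' i (by omega) ((hsing _).mpr (by rw [List.head?_drop, List.getElem?_eq_getElem hi, hei]))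
    have : (PySem.Chars.find dl [c]).toNat = i := by omega
    simp only []
    omega

theorem pvJoin_nil (parts : List (List Char)) : PySem.Chars.join [] parts = parts.flatten := by
  induction parts with
  | nil => simp [PySem.Chars.join, List.intercalate]
  | cons a t ih => cases t <;> simp_all [PySem.Chars.join, List.intercalate, List.intersperse]

def pvUnmarked (dl : List Char) (used : List Bool) : List Char :=
  ((dl.zip used).filter (fun p => !p.2)).map Prod.fst

def pvRes (dl : List Char) (s : List Char) (used : List Bool) : Bool :=
  match pvMarkChars dl s used with
  | none => false
  | some u => u.all id

theorem pvMarkChars_append (dl : List Char) (a b : List Char) :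
    ∀ used, pvMarkChars dl (a ++ b) used
      = (pvMarkChars dl a used).bind (fun u => pvMarkChars dl b u) := by
  induction a with
  | nil => intro used; simp [pvMarkChars]
  | cons d rest ih =>
    intro used
    simp only [List.cons_append, pvMarkChars]
    split
    · rfl
    · exact ih _

theorem pvMarkList_eq (dl : List Char) (l : List Int) :
    ∀ used, pvMarkList dl l used = pvMarkChars dl ((l.map PySem.Int.toChars).flatten) used := by
  induction l with
  | nil => intro used; simp [pvMarkList, pvMarkChars]
  | cons n rest ih =>
    intro used
    simp only [pvMarkList, List.map_cons, List.flatten_cons, pvMarkChars_append]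
    cases h : pvMarkChars dl (PySem.Int.toChars n) used with
    | none => simp
    | some u => simp [ih u]

theorem pvUnmarked_nil_iff (dl : List Char) :
    ∀ used, used.length = dl.length → (pvUnmarked dl used = [] ↔ used.all id = true) := by
  induction dl with
  | nil =>
    intro used h
    simp only [List.length_nil] at h
    rw [List.length_eq_zero_iff] at h
    subst h; simp [pvUnmarked]
  | cons d t ih =>
    intro used h
    cases used with
    | nil => simp at h
    | cons b ut =>
      simp only [List.length_cons] at h
      have := ih ut (by omega)
      cases b
      · simp only [pvUnmarked, List.zip_cons_cons] at this ⊢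
        simp only [List.filter_cons, Bool.not_false]
        simp
      · simp only [pvUnmarked, List.zip_cons_cons] at this ⊢
        simpa using this

theorem mem_pvUnmarked (dl : List Char) (used : List Bool) (c : Char)
    (h : used.length = dl.length) :
    c ∈ pvUnmarked dl used ↔ ∃ j, ∃ hj : j < dl.length, dl[j] = c ∧ used[j]'(h ▸ hj) = false := by
  constructor
  · intro hmem
    simp only [pvUnmarked, List.mem_map, List.mem_filter] at hmem
    obtain ⟨⟨a, b⟩, ⟨hz, hb⟩, hab⟩ := hmem
    obtain ⟨j, hj, hget⟩ := List.mem_iff_getElem.mp hz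
    have hjl : j < dl.length := by rw [List.length_zip] at hj; omega
    rw [List.getElem_zip] at hget
    simp only [Prod.mk.injEq] at hget
    simp only at hab
    refine ⟨j, hjl, by rw [hget.1, hab], ?_⟩
    simp only [Bool.not_eq_eq_eq_not, Bool.not_true] at hb
    rw [hget.2, hb]
  · rintro ⟨j, hj, hc, hu⟩
    simp only [pvUnmarked, List.mem_map, List.mem_filter]
    refine ⟨(c, false), ⟨?_, rfl⟩, rfl⟩
    have hjz : j < (dl.zip used).length := by rw [List.length_zip]; omega
    have hz : (dl.zip used)[j]'hjz = (c, false) := by rw [List.getElem_zip]; simp [hc, hu]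
    exact hz ▸ List.getElem_mem hjz

theorem pvUnmarked_set (dl : List Char) :
    dl.Nodup → ∀ used i (hi : i < dl.length) (hl : used.length = dl.length), used[i]'(by omega) = false →
      pvUnmarked dl (used.set i true) = (pvUnmarked dl used).erase (dl[i]'hi) := by
  induction dl with
  | nil => intro _ _ i hi; simp at hi
  | cons d dt ih =>
    intro hnd used i hi hl hu
    cases used with
    | nil => simp at hl
    | cons b ut =>
      simp only [List.length_cons] at hl hi
      obtain ⟨hdni, hnd'⟩ := List.nodup_cons.mp hnd
      cases i with
      | zero =>
        simp only [List.getElem_cons_zero] at hu ⊢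
        subst hu
        simp [pvUnmarked, List.zip_cons_cons, List.erase_cons_head]
      | succ k =>
        have hk : k < dt.length := by omega
        simp only [List.getElem_cons_succ] at hu ⊢
        have hrec := ih hnd' ut k hk (by omega) hu
        have hdne : ¬ ((d == dt[k]'hk) = true) := by
          simp only [beq_iff_eq]
          exact fun he => hdni (he ▸ List.getElem_mem hk)
        cases b
        · simp only [pvUnmarked, List.zip_cons_cons, List.set_cons_succ, List.filter_cons,
            Bool.not_false, if_true, List.map_cons] at hrec ⊢
          rw [hrec, List.erase_cons_tail hdne]
        · simpa only [pvUnmarked, List.zip_cons_cons, List.set_cons_succ, List.filter_cons,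
            Bool.not_true, List.map_cons] using hrec

theorem pvRes_iff (dl : List Char) (hnd : dl.Nodup) :
    ∀ s used, used.length = dl.length →
      (pvRes dl s used = true ↔ s.Perm (pvUnmarked dl used)) := by
  intro s
  induction s with
  | nil =>
    intro used hlen
    simp only [pvRes, pvMarkChars]
    rw [List.nil_perm]
    exact (pvUnmarked_nil_iff dl used hlen).symm
  | cons c rest ih =>
    intro used hlen
    simp only [pvRes, pvMarkChars, pvFind_singleton]
    cases hidx : List.idxOf? c dl with
    | none =>
      have hc : c ∉ dl := List.idxOf?_eq_none_iff.mp hidx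
      simp only [reduceCtorEq, BEq.rfl, Bool.true_or, if_true]
      constructor
      · intro h; cases h
      · intro hp
        obtain ⟨j, hj, hcj, -⟩ := (mem_pvUnmarked dl used c hlen).mp (hp.subset (List.mem_cons_self))
        exact absurd (hcj ▸ List.getElem_mem hj) hc
    | some i =>
      obtain ⟨hi, hei, hmin⟩ := List.idxOf?_eq_some_iff.mp hidx
      have hlti : i < used.length := by omega
      have hij : (((i : Int)) == (-1 : Int)) = false := by
        simp only [beq_eq_false_iff_ne, ne_eq]
        omega
      rw [PySem.List.pyGetD_natCast used i false, List.getD_eq_getElem used false hlti, hij]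
      cases hu : used[i]'hlti with
      | true =>
        simp only [Bool.false_or, if_true]
        constructor
        · intro h; cases h
        · intro hp
          obtain ⟨j, hj, hcj, hfu⟩ := (mem_pvUnmarked dl used c hlen).mp (hp.subset (List.mem_cons_self))
          have hji : j = i := hnd.getElem_inj_iff.mp (hcj.trans hei.symm)
          have h1 : used.getD i false = true := by
            rw [List.getD_eq_getElem used false hlti]; exact hu
          have h2 : used.getD j false = false := by
            rw [List.getD_eq_getElem used false (by omega)]; exact hfu
          rw [hji, h1] at h2
          cases h2
      | false =>
        simp only [Bool.false_or, if_false, Bool.false_eq_true]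
        rw [PySem.List.pySetD_natCast]
        have hlen' : (used.set i true).length = dl.length := by
          rw [List.length_set]; exact hlen
        have hrec := ih (used.set i true) hlen'
        rw [pvUnmarked_set dl hnd used i hi hlen hu, hei] at hrec
        unfold pvRes at hrec
        rw [hrec]
        have hcmem : c ∈ pvUnmarked dl used :=
          (mem_pvUnmarked dl used c hlen).mpr ⟨i, hi, hei, hu⟩
        constructor
        · intro hp
          exact List.cons_perm_iff_perm_erase.mpr ⟨hcmem, hp⟩
        · intro hp
          exact (List.cons_perm_iff_perm_erase.mp hp).2

theorem pvMark_length (dl : List Char) :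
    ∀ s used u, pvMarkChars dl s used = some u → u.length = used.length := by
  intro s
  induction s with
  | nil => intro used u h; cases h; rfl
  | cons d rest ih =>
    intro used u h
    simp only [pvMarkChars] at h
    split at h
    · cases h
    · have := ih _ _ h
      simpa [PySem.List.length_pySetD] using this

theorem pvMark_preserve (dl : List Char) :
    ∀ s used u, pvMarkChars dl s used = some u →
      ∀ j, (∀ c, List.idxOf? c dl ≠ some j) → u.getD j false = used.getD j false := by
  intro s
  induction s with
  | nil => intro used u h j hj; cases h; rfl
  | cons d rest ih =>
    intro used u h j hj
    simp only [pvMarkChars, pvFind_singleton] at h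
    cases hidx : List.idxOf? d dl with
    | none => rw [hidx] at h; simp at h
    | some i =>
      rw [hidx] at h
      simp only at h
      split at h
      · cases h
      · have hne : i ≠ j := fun he => hj d (he ▸ hidx)
        rw [PySem.List.pySetD_natCast] at h
        rw [ih _ _ h j hj]
        simp [List.getD_eq_getElem?_getD, List.getElem?_set_ne hne]

theorem pvUnmarked_replicate (dl : List Char) :
    pvUnmarked dl (List.replicate dl.length false) = dl := by
  induction dl with
  | nil => rfl
  | cons d t ih => simpa [pvUnmarked, List.replicate_succ, List.zip_cons_cons] using ih

theorem pvNotNodup_exists (dl : List Char) (h : ¬ dl.Nodup) :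
    ∃ i j, ∃ (hi : i < dl.length) (hj : j < dl.length), i < j ∧ dl[i] = dl[j] := by
  rw [List.nodup_iff_injective_getElem] at h
  simp only [Function.Injective] at h
  push Not at h
  obtain ⟨⟨i, hi⟩, ⟨j, hj⟩, he, hne⟩ := h
  simp only [ne_eq, Fin.mk.injEq] at he hne
  rcases Nat.lt_or_ge i j with hlt | hge
  · exact ⟨i, j, hi, hj, hlt, he⟩
  · exact ⟨j, i, hj, hi, by omega, he.symm⟩

theorem pvA_false_of_not_nodup (lst : List Int) (digits : String)
    (h : ¬ digits.toList.Nodup) : setIsPandigital lst digits = false := by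
  obtain ⟨i, j, hi, hj, hij, heq⟩ := pvNotNodup_exists digits.toList h
  have hbad : ∀ c, List.idxOf? c digits.toList ≠ some j := by
    intro c hc
    obtain ⟨hj', he', hmin⟩ := List.idxOf?_eq_some_iff.mp hc
    exact hmin i hij (heq.trans he')
  unfold setIsPandigital
  rw [pvMarkList_eq]
  cases hm : pvMarkChars digits.toList ((lst.map PySem.Int.toChars).flatten)
      (List.replicate digits.toList.length false) with
  | none => rfl
  | some u =>
    have hlen : u.length = digits.toList.length := by
      simpa using pvMark_length digits.toList _ _ u hm
    have hpres := pvMark_preserve digits.toList _ _ u hm j hbad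
    have hj' : j < digits.length := by simpa using hj
    have hrep : (List.replicate digits.toList.length false).getD j false = false := by
      simp [List.getD_eq_getElem?_getD, hj']
    have huj : u[j]'(by omega) = false := by
      rw [← List.getD_eq_getElem u false (by omega), hpres, hrep]
    simp only []
    exact List.all_eq_false.mpr ⟨u[j]'(by omega), List.getElem_mem _, by simp [huj]⟩

theorem pvB_false_of_not_nodup (lst : List Int) (digits : String)
    (h : ¬ digits.toList.Nodup) : setIsPandigital_alt lst digits = false := by
  unfold setIsPandigital_alt
  have hlt : (PySem.Set.ofList digits.toList).length ≠ digits.toList.length := by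
    intro hcon
    have hsub : PySem.Set.ofList digits.toList ⊆ digits.toList := by
      intro x hx
      exact (PySem.Set.mem_ofList digits.toList x).mp hx
    have hsp := (PySem.Set.nodup_ofList digits.toList).subperm hsub
    have hperm := hsp.perm_of_length_le (by omega)
    exact h (hperm.nodup (PySem.Set.nodup_ofList digits.toList))
  have hfirst : (PySem.Set.len (PySem.Set.ofList digits.toList) == ((digits.toList.length : Int))) = false := by
    simp only [PySem.Set.len, beq_eq_false_iff_ne, ne_eq]
    intro hcon
    exact hlt (by exact_mod_cast hcon)
  rw [show (let d := digits.toList;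
      let s := PySem.Chars.join [] (lst.map PySem.Int.toChars);
      (PySem.Set.len (PySem.Set.ofList d) == (d.length : Int))
        && (PySem.List.sorted s (fun x => x) == PySem.List.sorted d (fun x => x)))
    = ((PySem.Set.len (PySem.Set.ofList digits.toList) == ((digits.toList.length : Int)))
        && (PySem.List.sorted (PySem.Chars.join [] (lst.map PySem.Int.toChars)) (fun x => x)
            == PySem.List.sorted digits.toList (fun x => x))) from rfl, hfirst, Bool.false_and]

-- ===== VERDICT (by name: the statement is the Claim_ definition above) =====
theorem setIsPandigital_spec : Claim_equal_setIsPandigital := by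
  intro lst digits _
  unfold Spec_setIsPandigital
  by_cases hnd : digits.toList.Nodup
  · have hA : setIsPandigital lst digits
        = pvRes digits.toList ((lst.map PySem.Int.toChars).flatten)
            (List.replicate digits.toList.length false) := by
      unfold setIsPandigital pvRes
      rw [pvMarkList_eq]
    have hiff := pvRes_iff digits.toList hnd ((lst.map PySem.Int.toChars).flatten)
      (List.replicate digits.toList.length false) (by simp)
    rw [pvUnmarked_replicate] at hiff
    have hBiff : setIsPandigital_alt lst digits = true
        ↔ ((lst.map PySem.Int.toChars).flatten).Perm digits.toList := by
      unfold setIsPandigital_alt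
      simp only [pvJoin_nil, PySem.Set.ofList_eq_self_of_nodup _ hnd, PySem.Set.len,
        beq_self_eq_true, Bool.true_and, beq_iff_eq,
        PySem.List.sorted_id_eq_sorted_id_iff_perm]
    rw [Bool.eq_iff_iff, hA, hiff, hBiff]
  · rw [pvA_false_of_not_nodup lst digits hnd, pvB_false_of_not_nodup lst digits hnd]
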